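-- pv_equiv track=rewrite | github.com/9046balaji/Heart | chatbot_service/core/main_router.py | extract_drug_name
-- ===== SOURCE A (Python) =====
-- def extract_drug_name(query: str) -> str:
--     """
--     Extract drug name from user query with improved NLP heuristics.
--
--     Uses multiple strategies to identify drug names:
--     1. Capitalized words (proper nouns - like "Lipitor", "Warfarin")
--     2. Contextual keywords (words after "taking", "drug", "medication")
--     3. Multi-word drug names (like "High Blood Pressure")
--     4. Common drug name patterns
--
--     Args:
--         query: User's natural language query
--
--     Returns:
--         Extracted drug name or empty string
--     """
--     # Context keywords that precede drug names
--     context_keywords = {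
--         'taking': 1,
--         'took': 1,
--         'take': 1,
--         'medication': 1,
--         'medicine': 1,
--         'drug': 1,
--         'called': 1,
--         'named': 1,
--         'prescription': 1,
--         'prescribed': 1,
--     }
--
--     # Common words to skip
--     skip_words = {
--         'the', 'is', 'a', 'an', 'are', 'of', 'and', 'or', 'take', 'taking',
--         'causes', 'cause', 'side', 'effects', 'about', 'what', 'does',
--         'do', 'i', 'you', 'me', 'him', 'her', 'it', 'they', 'we',
--         'be', 'have', 'has', 'had', 'will', 'would', 'can', 'could',
--         'should', 'may', 'might', 'safe', 'dangerous', 'risk', 'adverse',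
--         'if', 'from', 'with', 'for', 'on', 'in', 'at', 'by', 'to',
--         'interactions', 'interactions', 'my', 'his', 'her', 'their',
--     }
--
--     words = query.split()
--
--     # Strategy 1: Look for capitalized words (proper nouns - drug names)
--     for i, word in enumerate(words):
--         clean_word = word.strip('.,!?;:')
--         if clean_word and len(clean_word) > 2:
--             # Check if it's a capitalized word (proper noun)
--             if clean_word[0].isupper() and clean_word.lower() not in skip_words:
--                 return clean_word
--
--     # Strategy 2: Look for words following context keywords
--     for i, word in enumerate(words):
--         if word.lower() in context_keywords and i + 1 < len(words):
--             next_word = words[i + 1].strip('.,!?;:')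
--             if next_word and len(next_word) > 2 and next_word.lower() not in skip_words:
--                 return next_word.capitalize()
--
--     # Strategy 3: Look for any significant word that's not a common word
--     for word in words:
--         clean_word = word.strip('.,!?;:')
--         if (clean_word and
--             len(clean_word) > 3 and
--             clean_word.lower() not in skip_words and
--             not clean_word.lower() in ['medication', 'medicine', 'drug', 'pill', 'tablet']):
--             return clean_word.capitalize()
--
--     return ""
-- ===== SOURCE B (Python) =====
-- def extract_drug_name(query: str) -> str:
--     """Single pass over the words: maintain one candidate slot per strategy,
--     each recorded only at its first match, then return by strategy priority."""
--     context_keywords = frozenset((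
--         'taking', 'took', 'take', 'medication', 'medicine', 'drug',
--         'called', 'named', 'prescription', 'prescribed',
--     ))
--     skip_words = frozenset((
--         'the', 'is', 'a', 'an', 'are', 'of', 'and', 'or', 'take', 'taking',
--         'causes', 'cause', 'side', 'effects', 'about', 'what', 'does',
--         'do', 'i', 'you', 'me', 'him', 'her', 'it', 'they', 'we',
--         'be', 'have', 'has', 'had', 'will', 'would', 'can', 'could',
--         'should', 'may', 'might', 'safe', 'dangerous', 'risk', 'adverse',
--         'if', 'from', 'with', 'for', 'on', 'in', 'at', 'by', 'to',
--         'interactions', 'my', 'his', 'their',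
--     ))
--     generic = ('medication', 'medicine', 'drug', 'pill', 'tablet')
--
--     words = query.split()
--     cap_candidate = context_candidate = significant_candidate = None
--     for i, word in enumerate(words):
--         clean = word.strip('.,!?;:')
--         if (cap_candidate is None and clean and len(clean) > 2
--                 and clean[0].isupper() and clean.lower() not in skip_words):
--             cap_candidate = clean
--         if (context_candidate is None and word.lower() in context_keywords
--                 and i + 1 < len(words)):
--             nxt = words[i + 1].strip('.,!?;:')
--             if nxt and len(nxt) > 2 and nxt.lower() not in skip_words:
--                 context_candidate = nxt.capitalize()
--         if (significant_candidate is None and clean and len(clean) > 3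
--                 and clean.lower() not in skip_words
--                 and clean.lower() not in generic):
--             significant_candidate = clean.capitalize()
--     return cap_candidate or context_candidate or significant_candidate or ""
-- ===== Notes on version B (the rewrite author's own statement) =====
-- stated objective: alternative
-- what changed: Replaced A's three sequential scans of the word list (one per strategy) by a single pass that records a first-match candidate per strategy in three slots and returns them in strategy priority.
import Mathlib
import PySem

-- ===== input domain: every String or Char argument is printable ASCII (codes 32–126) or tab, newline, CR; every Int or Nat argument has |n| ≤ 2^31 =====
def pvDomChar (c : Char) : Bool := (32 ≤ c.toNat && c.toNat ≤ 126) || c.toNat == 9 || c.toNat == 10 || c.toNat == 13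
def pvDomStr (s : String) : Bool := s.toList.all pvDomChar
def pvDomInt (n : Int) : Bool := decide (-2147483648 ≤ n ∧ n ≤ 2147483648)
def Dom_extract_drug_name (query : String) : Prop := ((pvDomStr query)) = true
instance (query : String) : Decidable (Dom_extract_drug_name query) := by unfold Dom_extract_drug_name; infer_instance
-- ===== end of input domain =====

-- B replaces A's three sequential scans of the word list by ONE pass keeping a
-- first-match candidate slot per strategy, returned in strategy priority (alternative decomposition).

-- shared constants / word-level builtins (both Pythons use the same literals and str methods)
def pvSkip : List String :=
  ["the", "is", "a", "an", "are", "of", "and", "or", "take", "taking",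
   "causes", "cause", "side", "effects", "about", "what", "does",
   "do", "i", "you", "me", "him", "her", "it", "they", "we",
   "be", "have", "has", "had", "will", "would", "can", "could",
   "should", "may", "might", "safe", "dangerous", "risk", "adverse",
   "if", "from", "with", "for", "on", "in", "at", "by", "to",
   "interactions", "my", "his", "their"]

def pvCtx : List String :=
  ["taking", "took", "take", "medication", "medicine", "drug",
   "called", "named", "prescription", "prescribed"]

def pvGeneric : List String := ["medication", "medicine", "drug", "pill", "tablet"]

-- word.strip('.,!?;:')
def pvStrip (s : String) : String := PySem.Str.stripChars s ".,!?;:"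

-- s.capitalize() (ASCII-exact: upper first char, lower the rest)
def pvCap (s : String) : String :=
  match s.toList with
  | [] => ""
  | c :: t => String.ofList (PySem.Chars.upperChar c :: PySem.Chars.lower t)

-- s[0].isupper() for nonempty s (guarded by the callers)
def pvFirstUpper (s : String) : Bool :=
  match s.toList with
  | [] => false
  | c :: _ => PySem.Chars.isupper c

-- ===== PORT A =====
-- Strategy 1 loop: first capitalized clean word (nested ifs as in A)
def pvS1 : List String → Option String
  | [] => none
  | w :: rest =>
    let c := pvStrip w
    if c ≠ "" ∧ c.toList.length > 2 then
      if pvFirstUpper c = true ∧ pvSkip.contains (PySem.Str.lower c) = false then some c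
      else pvS1 rest
    else pvS1 rest

-- Strategy 2 loop: word after a context keyword (i+1 < len ↔ a next word exists)
def pvS2 : List String → Option String
  | [] => none
  | [_] => none
  | w :: next :: rest =>
    if pvCtx.contains (PySem.Str.lower w) = true then
      let n := pvStrip next
      if n ≠ "" ∧ n.toList.length > 2 ∧ pvSkip.contains (PySem.Str.lower n) = false then
        some (pvCap n)
      else pvS2 (next :: rest)
    else pvS2 (next :: rest)

-- Strategy 3 loop: first significant non-generic word
def pvS3 : List String → Option String
  | [] => none
  | w :: rest =>
    let c := pvStrip w
    if c ≠ "" ∧ c.toList.length > 3 ∧ pvSkip.contains (PySem.Str.lower c) = false ∧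
        pvGeneric.contains (PySem.Str.lower c) = false then
      some (pvCap c)
    else pvS3 rest

def extract_drug_name (query : String) : String :=
  let words := PySem.Str.split₀ query
  match pvS1 words with
  | some r => r
  | none =>
    match pvS2 words with
    | some r => r
    | none =>
      match pvS3 words with
      | some r => r
      | none => ""

-- ===== PORT B =====
-- python 'x or y' on these (None / nonempty-string) candidates
def pvOr (a b : Option String) : Option String :=
  match a with
  | some x => some x
  | none => b

-- one pass, three first-match candidate slots; next word seen via the tail pattern
def pvLoop : List String → Option String → Option String → Option String →
    Option String × Option String × Option String
  | [], c1, c2, c3 => (c1, c2, c3)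
  | w :: rest, c1, c2, c3 =>
    let clean := pvStrip w
    let c1' := if c1 = none ∧ clean ≠ "" ∧ clean.toList.length > 2 ∧
        pvFirstUpper clean = true ∧ pvSkip.contains (PySem.Str.lower clean) = false
      then some clean else c1
    let c2' :=
      match rest with
      | [] => c2
      | next :: _ =>
        let n := pvStrip next
        if c2 = none ∧ pvCtx.contains (PySem.Str.lower w) = true ∧ n ≠ "" ∧
            n.toList.length > 2 ∧ pvSkip.contains (PySem.Str.lower n) = false
        then some (pvCap n) else c2
    let c3' := if c3 = none ∧ clean ≠ "" ∧ clean.toList.length > 3 ∧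
        pvSkip.contains (PySem.Str.lower clean) = false ∧
        pvGeneric.contains (PySem.Str.lower clean) = false
      then some (pvCap clean) else c3
    pvLoop rest c1' c2' c3'

def extract_drug_name_alt (query : String) : String :=
  let r := pvLoop (PySem.Str.split₀ query) none none none
  (pvOr r.1 (pvOr r.2.1 r.2.2)).getD ""

-- ===== PRECONDITION & SPEC =====
def Spec_extract_drug_name (query : String) (out : String) : Prop := out = extract_drug_name_alt query
instance (query : String) (out : String) : Decidable (Spec_extract_drug_name query out) := by unfold Spec_extract_drug_name; infer_instance

-- ===== CLAIM (what is proved, stated in full; the proofs are below) =====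
def Claim_equal_extract_drug_name : Prop := ∀ (query : String), Dom_extract_drug_name query → Spec_extract_drug_name query (extract_drug_name query)

-- ===== LEMMAS AND PROOFS =====

theorem pvOr_none (a : Option String) : pvOr a none = a := by
  cases a <;> rfl

-- the single pass computes each strategy's first match, joined behind the incoming slots
theorem pvLoop_eq (ws : List String) : ∀ c1 c2 c3, pvLoop ws c1 c2 c3 =
    (pvOr c1 (pvS1 ws), pvOr c2 (pvS2 ws), pvOr c3 (pvS3 ws)) := by
  induction ws with
  | nil => intro c1 c2 c3; simp [pvLoop, pvS1, pvS2, pvS3, pvOr_none]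
  | cons w rest ih =>
    intro c1 c2 c3
    cases rest with
    | nil =>
      show pvLoop [] _ _ _ = _
      simp only [pvLoop, pvS1, pvS2, pvS3]
      refine Prod.ext ?_ (Prod.ext ?_ ?_) <;> simp only
      · cases c1 <;> split_ifs <;> simp_all [pvOr]
      · exact (pvOr_none c2).symm
      · cases c3 <;> split_ifs <;> simp_all [pvOr]
    | cons next rs =>
      show pvLoop (next :: rs) _ _ _ = _
      rw [ih]
      simp only [pvS1, pvS2, pvS3]
      refine Prod.ext ?_ (Prod.ext ?_ ?_) <;> simp only
      · cases c1 <;> split_ifs <;> simp_all [pvOr]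
      · cases c2 <;> split_ifs <;> simp_all [pvOr]
      · cases c3 <;> split_ifs <;> simp_all [pvOr]

-- ===== VERDICT (by name: the statement is the Claim_ definition above) =====
theorem extract_drug_name_spec : Claim_equal_extract_drug_name := by
  intro query _
  unfold Spec_extract_drug_name extract_drug_name extract_drug_name_alt
  rw [pvLoop_eq]
  simp only [pvOr]
  cases h1 : pvS1 (PySem.Str.split₀ query) <;>
    cases h2 : pvS2 (PySem.Str.split₀ query) <;>
      cases h3 : pvS3 (PySem.Str.split₀ query) <;> simp
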